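-- pv_equiv track=rewrite | github.com/Da-Pen/pythonTeach | contest/CCC_past_contests/2021_junior.py | books_sorted
-- ===== SOURCE A (Python) =====
-- def books_sorted(books):
--     cur_index = 0
--     while cur_index < len(books) and books[cur_index] == "L":
--         cur_index += 1
--     while cur_index < len(books) and books[cur_index] == "M":
--         cur_index += 1
--     while cur_index < len(books) and books[cur_index] == "S":
--         cur_index += 1
--
--     return cur_index == len(books)
-- ===== SOURCE B (Python) =====
-- def books_sorted(books):
--     order = {'L': 0, 'M': 1, 'S': 2}
--     prev = 0
--     for b in books:
--         if b not in order:
--             return False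
--         r = order[b]
--         if r < prev:
--             return False
--         prev = r
--     return True
-- ===== Notes on version B (the rewrite author's own statement) =====
-- stated objective: simpler
-- what changed: Replaces the three index-based while loops consuming the L, M and S blocks with a single pass over the list checking that each book's rank in the order L<M<S is defined and non-decreasing.
import Mathlib
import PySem

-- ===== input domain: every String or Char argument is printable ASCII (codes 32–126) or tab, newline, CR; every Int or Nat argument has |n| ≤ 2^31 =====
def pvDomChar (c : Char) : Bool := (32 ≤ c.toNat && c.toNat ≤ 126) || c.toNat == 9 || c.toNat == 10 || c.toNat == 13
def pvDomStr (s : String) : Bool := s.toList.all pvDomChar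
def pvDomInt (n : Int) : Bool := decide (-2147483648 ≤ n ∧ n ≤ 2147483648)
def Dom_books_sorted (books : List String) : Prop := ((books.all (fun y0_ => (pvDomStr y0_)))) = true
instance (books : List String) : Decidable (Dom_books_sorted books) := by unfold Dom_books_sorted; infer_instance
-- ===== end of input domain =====

-- B replaces A's three block-consuming while loops with one pass checking a non-decreasing L<M<S rank; objective: simpler.

-- ===== PORT A =====
-- one while loop 'while cur_index < len(books) and books[cur_index] == s: cur_index += 1'
def booksSkip (books : List String) (s : String) (i : Nat) : Nat :=
  if h : i < books.length then
    if books[i] = s then booksSkip books s (i + 1) else i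
  else i
termination_by books.length - i

def books_sorted (books : List String) : Bool :=
  let i1 := booksSkip books "L" 0
  let i2 := booksSkip books "M" i1
  let i3 := booksSkip books "S" i2
  i3 == books.length

-- ===== PORT B =====
-- order = {'L':0,'M':1,'S':2}; lookup returning none when the key is absent
def bookRank (b : String) : Option Nat :=
  if b = "L" then some 0 else if b = "M" then some 1 else if b = "S" then some 2 else none

-- the for loop with accumulator prev
def booksCheck (prev : Nat) : List String → Bool
  | [] => true
  | b :: rest =>
    match bookRank b with
    | none => false
    | some r => if r < prev then false else booksCheck r rest

def books_sorted_alt (books : List String) : Bool := booksCheck 0 books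

-- ===== PRECONDITION & SPEC =====
def Spec_books_sorted (books : List String) (out : Bool) : Prop := out = books_sorted_alt books
instance (books : List String) (out : Bool) : Decidable (Spec_books_sorted books out) := by unfold Spec_books_sorted; infer_instance

-- ===== CLAIM (what is proved, stated in full; the proofs are below) =====
def Claim_equal_books_sorted : Prop := ∀ (books : List String), Dom_books_sorted books → Spec_books_sorted books (books_sorted books)

-- ===== LEMMAS AND PROOFS =====

-- booksSkip advances the index exactly past the leading block of s
theorem booksSkip_drop (books : List String) (s : String) (i : Nat) (hi : i ≤ books.length) :
    booksSkip books s i ≤ books.length ∧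
    books.drop (booksSkip books s i) = (books.drop i).dropWhile (fun b => b = s) := by
  fun_induction booksSkip books s i with
  | case1 i h heq ih =>
    have h1 : (books.drop i).dropWhile (fun b => b = s) =
        (books.drop (i+1)).dropWhile (fun b => b = s) := by
      rw [List.drop_eq_getElem_cons h, List.dropWhile_cons]
      simp [heq]
    have := ih h
    exact ⟨this.1, by rw [this.2, h1]⟩
  | case2 i h heq =>
    constructor
    · exact le_of_lt h
    · rw [List.drop_eq_getElem_cons h, List.dropWhile_cons]
      simp [heq, ← List.drop_eq_getElem_cons h]
  | case3 i h =>
    have : i = books.length := le_antisymm hi (le_of_not_gt h)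
    simp [this]

-- single-block characterisations of booksCheck at prev = 2, 1, 0
theorem booksCheck_two (l : List String) :
    booksCheck 2 l = (l.dropWhile (fun b => b = "S")).isEmpty := by
  induction l with
  | nil => simp [booksCheck]
  | cons b rest ih =>
    rw [List.dropWhile_cons]
    by_cases hS : b = "S"
    · simp [booksCheck, bookRank, hS, ih]
    · by_cases hL : b = "L" <;> by_cases hM : b = "M" <;>
        simp_all [booksCheck, bookRank]

theorem booksCheck_one (l : List String) :
    booksCheck 1 l = ((l.dropWhile (fun b => b = "M")).dropWhile (fun b => b = "S")).isEmpty := by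
  induction l with
  | nil => simp [booksCheck]
  | cons b rest ih =>
    rw [List.dropWhile_cons]
    by_cases hM : b = "M"
    · simp [booksCheck, bookRank, hM, ih]
    · rw [if_neg (by simpa using hM), List.dropWhile_cons]
      by_cases hS : b = "S"
      · simpa [booksCheck, bookRank, hM, hS] using booksCheck_two rest
      · by_cases hL : b = "L" <;> simp_all [booksCheck, bookRank]

theorem booksCheck_zero (l : List String) :
    booksCheck 0 l =
      (((l.dropWhile (fun b => b = "L")).dropWhile (fun b => b = "M")).dropWhile
        (fun b => b = "S")).isEmpty := by
  induction l with
  | nil => simp [booksCheck]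
  | cons b rest ih =>
    rw [List.dropWhile_cons]
    by_cases hL : b = "L"
    · simp [booksCheck, bookRank, hL, ih]
    · rw [if_neg (by simpa using hL), List.dropWhile_cons]
      by_cases hM : b = "M"
      · simpa [booksCheck, bookRank, hL, hM] using booksCheck_one rest
      · rw [if_neg (by simpa using hM), List.dropWhile_cons]
        by_cases hS : b = "S"
        · simpa [booksCheck, bookRank, hL, hM, hS] using booksCheck_two rest
        · simp [booksCheck, bookRank, hL, hM, hS]

-- ===== VERDICT (by name: the statement is the Claim_ definition above) =====
theorem books_sorted_spec : Claim_equal_books_sorted := by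
  intro books _
  unfold Spec_books_sorted books_sorted books_sorted_alt
  obtain ⟨h1le, h1⟩ := booksSkip_drop books "L" 0 (Nat.zero_le _)
  obtain ⟨h2le, h2⟩ := booksSkip_drop books "M" _ h1le
  obtain ⟨h3le, h3⟩ := booksSkip_drop books "S" _ h2le
  rw [booksCheck_zero]
  simp only [List.drop_zero] at h1
  rw [h1] at h2
  rw [h2] at h3
  have : (booksSkip books "S" (booksSkip books "M" (booksSkip books "L" 0)) == books.length) =
      (books.drop (booksSkip books "S" (booksSkip books "M" (booksSkip books "L" 0)))).isEmpty := by
    rcases Nat.eq_or_lt_of_le h3le with h | h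
    · rw [h]
      simp [List.drop_length]
    · have h1 : (booksSkip books "S" (booksSkip books "M" (booksSkip books "L" 0)) ==
          books.length) = false := by simp [Nat.ne_of_lt h]
      have hne : books.drop (booksSkip books "S" (booksSkip books "M" (booksSkip books "L" 0))) ≠ [] := by
        intro he
        have := congrArg List.length he
        simp at this
        omega
      rw [h1, List.isEmpty_eq_false_iff.mpr hne]
  rw [this, h3]
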